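-- pv_equiv track=rewrite | github.com/NguyenTanYen/AI | Final_Project_Ca_nhan/GUI.py | kiemTraTrangThai
-- ===== SOURCE A (Python) =====
-- def kiemTraTrangThai(trang_thai_nhap):
--     da_thay = []
--     if trang_thai_nhap is None or len(trang_thai_nhap) != 9 or not trang_thai_nhap.isnumeric():
--         return False
--     for chu_so in trang_thai_nhap:
--         if chu_so in da_thay or chu_so == "9":
--             return False
--         da_thay.append(chu_so)
--     return True
-- ===== SOURCE B (Python) =====
-- def kiemTraTrangThai(trang_thai_nhap):
--     if trang_thai_nhap is None:
--         return False
--     return sorted(trang_thai_nhap) == list("012345678")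
-- ===== Notes on version B (the rewrite author's own statement) =====
-- stated objective: simpler
-- what changed: Instead of guarding on length/isnumeric and then running a seen-list accumulator loop with early returns, B observes that a valid state is exactly a rearrangement of the nine digits 0-8, so it sorts the string once and compares it with the single canonical sorted digit string; every explicit check (length, numeric, no nine, distinctness) disappears.
import Mathlib
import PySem

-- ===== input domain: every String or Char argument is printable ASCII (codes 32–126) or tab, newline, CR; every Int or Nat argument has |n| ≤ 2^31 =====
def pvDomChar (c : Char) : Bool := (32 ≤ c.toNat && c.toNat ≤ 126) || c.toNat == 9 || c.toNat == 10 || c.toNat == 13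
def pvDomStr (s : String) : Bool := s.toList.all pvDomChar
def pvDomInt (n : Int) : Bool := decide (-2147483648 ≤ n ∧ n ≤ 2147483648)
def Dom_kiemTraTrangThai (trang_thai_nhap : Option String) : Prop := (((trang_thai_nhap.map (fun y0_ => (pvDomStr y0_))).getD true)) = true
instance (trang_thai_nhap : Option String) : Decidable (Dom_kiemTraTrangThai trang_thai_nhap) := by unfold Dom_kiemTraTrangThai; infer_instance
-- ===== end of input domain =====

-- B replaces A's guard + seen-list accumulator loop by a single canonical test:
-- sort the string and compare it with the literal "012345678" (simpler decomposition).


-- ===== PORT A =====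
-- the for-loop over the characters, carrying the da_thay accumulator
def kttLoop : List Char → List Char → Bool
  | [], _ => true
  | c :: rest, da_thay =>
    if da_thay.contains c || c == '9' then false
    else kttLoop rest (da_thay ++ [c])

def kiemTraTrangThai (trang_thai_nhap : Option String) : Bool :=
  match trang_thai_nhap with
  | none => false
  | some s =>
    -- isnumeric coincides with isdigit on the printable-ASCII domain
    if s.toList.length ≠ 9 || !(PySem.Str.strIsdigit s) then false
    else kttLoop s.toList []

-- ===== PORT B =====
def kiemTraTrangThai_alt (trang_thai_nhap : Option String) : Bool :=
  match trang_thai_nhap with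
  | none => false
  | some s => PySem.List.sorted s.toList (fun x => x) false == "012345678".toList

-- ===== PRECONDITION & SPEC =====
def Spec_kiemTraTrangThai (trang_thai_nhap : Option String) (out : Bool) : Prop := out = kiemTraTrangThai_alt trang_thai_nhap
instance (trang_thai_nhap : Option String) (out : Bool) : Decidable (Spec_kiemTraTrangThai trang_thai_nhap out) := by unfold Spec_kiemTraTrangThai; infer_instance

-- ===== CLAIM (what is proved, stated in full; the proofs are below) =====
def Claim_equal_kiemTraTrangThai : Prop := ∀ (trang_thai_nhap : Option String), Dom_kiemTraTrangThai trang_thai_nhap → Spec_kiemTraTrangThai trang_thai_nhap (kiemTraTrangThai trang_thai_nhap)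

-- ===== LEMMAS AND PROOFS =====

-- the loop succeeds iff no '9' occurs and seen ++ l is duplicate-free
lemma kttLoop_true_iff (l : List Char) : ∀ seen : List Char, seen.Nodup →
    (kttLoop l seen = true ↔ '9' ∉ l ∧ (seen ++ l).Nodup) := by
  induction l with
  | nil => intro seen h; simp [kttLoop, h]
  | cons c rest ih =>
    intro seen hseen
    simp only [kttLoop]
    by_cases hc : (seen.contains c || c == '9') = true
    · rw [if_pos hc]
      simp only [Bool.or_eq_true, List.contains_iff_mem, beq_iff_eq] at hc
      constructor
      · intro h; cases h
      · rintro ⟨h9, hnd⟩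
        exfalso
        rcases hc with h | h
        · exact List.disjoint_of_nodup_append hnd h (List.mem_cons_self ..)
        · exact h9 (h ▸ List.mem_cons_self ..)
    · rw [if_neg hc]
      simp only [Bool.or_eq_true, List.contains_iff_mem, beq_iff_eq, not_or] at hc
      obtain ⟨hmem, h9c⟩ := hc
      have hnd : (seen ++ [c]).Nodup := by
        simp [List.nodup_append, hseen]
        exact fun a ha h => hmem (h ▸ ha)
      rw [ih _ hnd]
      constructor
      · rintro ⟨h9, hnd'⟩
        refine ⟨?_, by simpa [List.append_assoc] using hnd'⟩
        simp only [List.mem_cons, not_or]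
        exact ⟨fun h => h9c h.symm, h9⟩
      · rintro ⟨h9, hnd'⟩
        simp only [List.mem_cons, not_or] at h9
        exact ⟨h9.2, by simpa [List.append_assoc] using hnd'⟩

-- strIsdigit unfolded to a per-character condition
lemma strIsdigit_iff (s : String) :
    PySem.Str.strIsdigit s = true ↔ s.toList ≠ [] ∧ ∀ c ∈ s.toList, PySem.Chars.isdigit c = true := by
  simp [PySem.Str.strIsdigit, PySem.Chars.strIsdigit, List.all_eq_true]

lemma char_eq_of_toNat {c d : Char} (h : c.toNat = d.toNat) : c = d :=
  Char.ext (UInt32.toNat_inj.mp h)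

-- an ASCII digit other than '9' is one of the nine characters of "012345678"
lemma digit_mem_target (c : Char) (hd : PySem.Chars.isdigit c = true) (h9 : c ≠ '9') :
    c ∈ "012345678".toList := by
  simp only [PySem.Chars.isdigit, Bool.and_eq_true, decide_eq_true_eq] at hd
  have l1 : 48 ≤ c.toNat := hd.1
  have l2 : c.toNat ≤ 57 := hd.2
  have l3 : c.toNat ≠ 57 := fun h => h9 (char_eq_of_toNat (d := '9') h)
  have ht : "012345678".toList = ['0','1','2','3','4','5','6','7','8'] := by decide
  rw [ht]
  have hcases : c.toNat = 48 ∨ c.toNat = 49 ∨ c.toNat = 50 ∨ c.toNat = 51 ∨ c.toNat = 52 ∨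
      c.toNat = 53 ∨ c.toNat = 54 ∨ c.toNat = 55 ∨ c.toNat = 56 := by omega
  rcases hcases with h|h|h|h|h|h|h|h|h
  · simp [char_eq_of_toNat (d := '0') (h.trans (by decide))]
  · simp [char_eq_of_toNat (d := '1') (h.trans (by decide))]
  · simp [char_eq_of_toNat (d := '2') (h.trans (by decide))]
  · simp [char_eq_of_toNat (d := '3') (h.trans (by decide))]
  · simp [char_eq_of_toNat (d := '4') (h.trans (by decide))]
  · simp [char_eq_of_toNat (d := '5') (h.trans (by decide))]
  · simp [char_eq_of_toNat (d := '6') (h.trans (by decide))]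
  · simp [char_eq_of_toNat (d := '7') (h.trans (by decide))]
  · simp [char_eq_of_toNat (d := '8') (h.trans (by decide))]

-- A returns true exactly when the string is a permutation of "012345678"
lemma A_true_iff_perm (s : String) :
    kiemTraTrangThai (some s) = true ↔ s.toList.Perm "012345678".toList := by
  show (if (decide (s.toList.length ≠ 9) || !PySem.Str.strIsdigit s) = true then false
        else kttLoop s.toList []) = true ↔ s.toList.Perm "012345678".toList
  constructor
  · intro h
    by_cases hg : (decide (s.toList.length ≠ 9) || !PySem.Str.strIsdigit s) = true
    · rw [if_pos hg] at h; cases h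
    · rw [if_neg hg] at h
      simp only [Bool.or_eq_true, decide_eq_true_eq, Bool.not_eq_true', not_or,
        Bool.not_eq_false] at hg
      obtain ⟨hlen, hdig⟩ := hg
      have hlen9 : s.toList.length = 9 := by omega
      have hloop := (kttLoop_true_iff s.toList [] List.nodup_nil).mp h
      simp only [List.nil_append] at hloop
      obtain ⟨h9, hnd⟩ := hloop
      have hsub : s.toList ⊆ "012345678".toList := fun c hc =>
        digit_mem_target c (((strIsdigit_iff s).mp hdig).2 c hc) (fun he => h9 (he ▸ hc))
      have hsp : s.toList.Subperm "012345678".toList := hnd.subperm hsub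
      exact hsp.perm_of_length_le (by rw [hlen9]; decide)
  · intro hp
    have hlen9 : s.toList.length = 9 := by
      rw [hp.length_eq]; decide
    have hnd : s.toList.Nodup := hp.nodup_iff.mpr (by decide)
    have h9 : '9' ∉ s.toList := fun h => (by decide : '9' ∉ "012345678".toList) (hp.mem_iff.mp h)
    have hdig : PySem.Str.strIsdigit s = true := by
      rw [strIsdigit_iff]
      refine ⟨?_, fun c hc => ?_⟩
      · intro h; rw [h] at hlen9; simp at hlen9
      have := hp.mem_iff.mp hc
      have ht : "012345678".toList = ['0','1','2','3','4','5','6','7','8'] := by decide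
      rw [ht] at this
      simp only [List.mem_cons, List.not_mem_nil, or_false] at this
      rcases this with h|h|h|h|h|h|h|h|h <;> subst h <;> decide
    have hdig' : PySem.Chars.strIsdigit s.toList = true := hdig
    rw [if_neg (by simp [hlen9, hdig']), (kttLoop_true_iff s.toList [] List.nodup_nil)]
    exact ⟨h9, by simpa using hnd⟩

-- ===== VERDICT (by name: the statement is the Claim_ definition above) =====
theorem kiemTraTrangThai_spec : Claim_equal_kiemTraTrangThai := by
  intro t _
  unfold Spec_kiemTraTrangThai
  match t with
  | none => rfl
  | some s =>
    have hB : kiemTraTrangThai_alt (some s) = true ↔ s.toList.Perm "012345678".toList := by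
      unfold kiemTraTrangThai_alt
      rw [beq_iff_eq]
      constructor
      · intro h
        exact h ▸ (PySem.List.sorted_perm s.toList (fun x => x) false).symm
      · intro hp
        exact PySem.List.sorted_eq_of_perm_of_pairwise_lt s.toList "012345678".toList (fun x => x) hp.symm (by decide)
    rw [Bool.eq_iff_iff, A_true_iff_perm, ← hB]
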